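-- pv_equiv track=rewrite | github.com/sxominxi/ham_study | junseok/월말평가/1차월말평가/problem11.py | get_row_col_maxsum
-- ===== SOURCE A (Python) =====
-- def get_row_col_maxsum(matrix):
--     pass
--     # 여기에 코드를 작성하여 함수를 완성합니다.
--     cnt_c = 0
--     for _ in matrix:
--         cnt_c +=1
--     cnt_r = 0
--     for _ in matrix[0]:
--         cnt_r += 1
--
--     sum_list_r = []
--     for i in range(cnt_c):
--         sum_r = 0
--         for j in range(cnt_r):
--             sum_r += matrix[i][j]
--         sum_list_r.append(sum_r)
--
--     sum_list_c = []
--     for i in range(cnt_r):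
--         sum_c = 0
--         for j in range(cnt_c):
--             sum_c += matrix[j][i]
--         sum_list_c.append(sum_c)
--
--     max_r = sum_list_r[0]
--     for i in sum_list_r:
--         if max_r < i:
--             max_r = i
--
--     max_c = sum_list_c[0]
--     for i in sum_list_c:
--         if max_c < i:
--             max_c = i
--
--
--     if max_r < max_c:
--         return ('col', max_c)
--     else:
--         return ('row', max_r)
-- ===== SOURCE B (Python) =====
-- def get_row_col_maxsum(matrix):
--     # Single pass over the rows with an accumulator: running max row sum and a
--     # running column-sum vector updated by pairwise addition.
--     best_r = sum(matrix[0])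
--     cols = list(matrix[0])
--     for row in matrix[1:]:
--         s = sum(row)
--         if s > best_r:
--             best_r = s
--         cols = [c + x for c, x in zip(cols, row)]
--     best_c = max(cols)
--     return ('col', best_c) if best_r < best_c else ('row', best_r)
-- ===== Notes on version B (the rewrite author's own statement) =====
-- stated objective: alternative
-- what changed: Replaces A's six staged loops (two counting loops, two index-driven double loops building row- and column-sum lists, two running-max loops) with ONE left-to-right pass over the rows that maintains a pair accumulator: the running maximum row sum and a running column-sum vector updated by pairwise addition; only the final max over that vector remains, so no row-sum list, no transpose and no index arithmetic exist in B.
-- outside the precondition, e.g. on get_row_col_maxsum([[1, 2], [3, 4, 5]]): A returns ('row', 7), B returns ('row', 12)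
import Mathlib
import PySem

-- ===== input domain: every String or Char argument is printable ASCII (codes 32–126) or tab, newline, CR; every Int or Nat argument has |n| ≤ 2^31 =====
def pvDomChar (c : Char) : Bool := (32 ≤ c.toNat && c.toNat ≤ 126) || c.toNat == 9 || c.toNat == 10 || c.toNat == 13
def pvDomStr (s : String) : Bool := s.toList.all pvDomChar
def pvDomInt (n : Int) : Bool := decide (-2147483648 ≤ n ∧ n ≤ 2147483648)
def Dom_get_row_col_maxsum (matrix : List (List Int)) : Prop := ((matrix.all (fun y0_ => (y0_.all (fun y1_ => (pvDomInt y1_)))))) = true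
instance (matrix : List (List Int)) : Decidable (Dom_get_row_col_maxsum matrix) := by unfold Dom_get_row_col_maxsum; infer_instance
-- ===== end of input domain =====

-- B: single pass over the rows with a (running max row sum, running column-sum vector) accumulator, replacing A's six staged loops (objective: alternative).


-- ===== PORT A =====
def get_row_col_maxsum (matrix : List (List Int)) : String × Int :=
  let cnt_c : Int := matrix.foldl (fun c _ => c + 1) 0
  let cnt_r : Int := (PySem.List.pyGetD matrix 0 []).foldl (fun c _ => c + 1) 0
  let sum_list_r : List Int := (PySem.List.pyRange 0 cnt_c 1).foldl (fun acc i =>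
      acc ++ [(PySem.List.pyRange 0 cnt_r 1).foldl (fun s j =>
        s + PySem.List.pyGetD (PySem.List.pyGetD matrix i []) j 0) 0]) []
  let sum_list_c : List Int := (PySem.List.pyRange 0 cnt_r 1).foldl (fun acc i =>
      acc ++ [(PySem.List.pyRange 0 cnt_c 1).foldl (fun s j =>
        s + PySem.List.pyGetD (PySem.List.pyGetD matrix j []) i 0) 0]) []
  let max_r := sum_list_r.foldl (fun m i => if m < i then i else m) (PySem.List.pyGetD sum_list_r 0 0)
  let max_c := sum_list_c.foldl (fun m i => if m < i then i else m) (PySem.List.pyGetD sum_list_c 0 0)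
  if max_r < max_c then ("col", max_c) else ("row", max_r)

-- ===== PORT B =====
-- One fold over matrix[1:] (PySem.List.slice … 1 none) with a pair accumulator:
-- (running best row sum, running column-sum vector); '[c + x for c, x in zip(cols, row)]'
-- is List.zipWith (·+·) (exact: Python's zip truncates to the shorter list, as zipWith does).
def get_row_col_maxsum_alt (matrix : List (List Int)) : String × Int :=
  let first := PySem.List.pyGetD matrix 0 []
  let st := (PySem.List.slice matrix (some 1) none).foldl
      (fun (st : Int × List Int) row =>
        let s := row.sum
        (if s > st.1 then s else st.1, List.zipWith (· + ·) st.2 row))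
      (first.sum, first)
  let best_c := (PySem.List.max? st.2 (fun y => y)).getD 0
  if st.1 < best_c then ("col", best_c) else ("row", st.1)

-- ===== PRECONDITION & SPEC =====
-- Pre_ admits exactly the nonempty rectangular matrices with at least one column. Excluded:
-- inputs where A raises IndexError (empty matrix, empty first row, a row shorter than the
-- first row), and ragged matrices with rows longer than the first row — an unspecified corner
-- where A's value (row sums silently truncated to the first row's width) and B's value
-- (full-row sums, zip-truncated columns) are both accidental, equally defensible readings.
def Pre_get_row_col_maxsum (matrix : List (List Int)) : Prop :=
  matrix ≠ [] ∧ matrix.headD [] ≠ [] ∧ ∀ r ∈ matrix, r.length = (matrix.headD []).length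
instance (matrix : List (List Int)) : Decidable (Pre_get_row_col_maxsum matrix) := by
  unfold Pre_get_row_col_maxsum; infer_instance

def pvWitness_get_row_col_maxsum : List (List Int) := [[1, 2], [3, 4]]

def Spec_get_row_col_maxsum (matrix : List (List Int)) (out : String × Int) : Prop := out = get_row_col_maxsum_alt matrix
instance (matrix : List (List Int)) (out : String × Int) : Decidable (Spec_get_row_col_maxsum matrix out) := by unfold Spec_get_row_col_maxsum; infer_instance

-- ===== CLAIM (what is proved, stated in full; the proofs are below) =====
def Claim_equal_get_row_col_maxsum : Prop := ∀ (matrix : List (List Int)), Dom_get_row_col_maxsum matrix → Pre_get_row_col_maxsum matrix → Spec_get_row_col_maxsum matrix (get_row_col_maxsum matrix)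

-- ===== LEMMAS AND PROOFS =====

-- A's running-max loop seeded with l[0] IS foldl max over the tail.
theorem pvMaxLoopA (x : Int) (t : List Int) :
    (x :: t).foldl (fun m i => if m < i then i else m) (PySem.List.pyGetD (x :: t) 0 0)
      = t.foldl max x := by
  have hmax : (fun (m i : Int) => if m < i then i else m) = max := by
    funext m i
    by_cases hlt : m < i
    · rw [if_pos hlt, max_eq_right hlt.le]
    · rw [if_neg hlt, max_eq_left (not_lt.1 hlt)]
  rw [PySem.List.pyGetD_zero_cons, hmax]
  simp [List.foldl_cons]

-- A's 'for _ in l: cnt += 1' loop is the length.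
theorem pvCount {α : Type} (l : List α) : l.foldl (fun (c : Int) _ => c + 1) 0 = (l.length : Int) := by
  rw [PySem.List.foldl_add l (fun _ => (1 : Int)) 0, PySem.List.sum_map_const_int]
  ring

-- A's row-sum double loop over a rectangular matrix is the list of row sums.
theorem pvRowSums (m : List (List Int)) (n : Nat) (h : ∀ r ∈ m, r.length = n) :
    (PySem.List.pyRange 0 (m.length : Int) 1).foldl (fun acc i =>
        acc ++ [(PySem.List.pyRange 0 (n : Int) 1).foldl (fun s j =>
          s + PySem.List.pyGetD (PySem.List.pyGetD m i []) j 0) 0]) []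
      = m.map (fun row => row.sum) := by
  rw [PySem.List.foldl_append_singleton_eq_map]
  conv_rhs => rw [← PySem.List.map_pyGetD_pyRange_zero' m []]
  rw [List.map_map, List.nil_append]
  apply List.map_congr_left
  intro i hi
  simp only [Function.comp]
  have hmem : PySem.List.pyGetD m i [] ∈ m := by
    apply PySem.List.pyGetD_mem
    have := PySem.List.mem_pyRange_one.1 hi
    simp [PySem.Raise.InRange]
    omega
  rw [← h _ hmem, PySem.List.foldl_pyRange_zero_pyGetD' (PySem.List.pyGetD m i []) 0 (fun s x => s + x) 0,
    PySem.List.foldl_add]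
  simp

-- A's column-sum double loop is the list of index-wise column sums.
theorem pvColSums (m : List (List Int)) (n : Nat) :
    (PySem.List.pyRange 0 (n : Int) 1).foldl (fun acc i =>
        acc ++ [(PySem.List.pyRange 0 (m.length : Int) 1).foldl (fun s j =>
          s + PySem.List.pyGetD (PySem.List.pyGetD m j []) i 0) 0]) []
      = (List.range n).map (fun i => (m.map (fun r => r.getD i 0)).sum) := by
  rw [PySem.List.foldl_append_singleton_eq_map, List.nil_append]
  have step1 : ∀ i : Int,
      (PySem.List.pyRange 0 (m.length : Int) 1).foldl (fun s j =>
        s + PySem.List.pyGetD (PySem.List.pyGetD m j []) i 0) 0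
        = (m.map (fun r => PySem.List.pyGetD r i 0)).sum := by
    intro i
    rw [PySem.List.foldl_pyRange_zero_pyGetD' m [] (fun s r => s + PySem.List.pyGetD r i 0) 0,
      PySem.List.foldl_add]
    simp
  rw [List.map_congr_left (fun i _ => step1 i), PySem.List.pyRange_zero_natCast, List.map_map]
  apply List.map_congr_left
  intro k _
  simp [Function.comp, PySem.List.pyGetD_natCast]

-- B's pair fold splits into its two independent component folds.
theorem pvPairFold (l : List (List Int)) (a : Int) (c : List Int) :
    l.foldl (fun (st : Int × List Int) row =>
        let s := row.sum
        (if s > st.1 then s else st.1, List.zipWith (· + ·) st.2 row)) (a, c)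
      = (l.foldl (fun b row => if row.sum > b then row.sum else b) a,
         l.foldl (fun cs row => List.zipWith (· + ·) cs row) c) := by
  induction l generalizing a c with
  | nil => rfl
  | cons r t ih => simp only [List.foldl_cons]; exact ih _ _

-- B's best-row fold is foldl max over the row sums.
theorem pvBestRowFold (l : List (List Int)) (a : Int) :
    l.foldl (fun b row => if row.sum > b then row.sum else b) a
      = (l.map (fun row => row.sum)).foldl max a := by
  induction l generalizing a with
  | nil => rfl
  | cons r t ih =>
    simp only [List.foldl_cons, List.map_cons]
    rw [ih]
    congr 1
    by_cases h : r.sum > a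
    · rw [if_pos h, max_eq_right h.le]
    · rw [if_neg h, max_eq_left (not_lt.1 h)]

-- B's running zipWith-add fold over rectangular rows is the index-wise column-sum vector.
theorem pvColFold (n : Nat) : ∀ (rest : List (List Int)) (acc : List Int),
    acc.length = n → (∀ r ∈ rest, r.length = n) →
    rest.foldl (fun cs row => List.zipWith (· + ·) cs row) acc
      = (List.range n).map (fun i => acc.getD i 0 + (rest.map (fun r => r.getD i 0)).sum) := by
  intro rest
  induction rest with
  | nil =>
    intro acc ha _
    simp only [List.foldl_nil, List.map_nil, List.sum_nil, add_zero]
    apply List.ext_getElem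
    · simp [ha]
    · intro i h1 h2
      simp only [List.getElem_map, List.getElem_range]
      rw [List.getD_eq_getElem _ _ (by omega)]
  | cons r t ih =>
    intro acc ha hall
    have hr : r.length = n := hall r List.mem_cons_self
    have hz : (List.zipWith (· + ·) acc r).length = n := by simp [ha, hr]
    rw [List.foldl_cons, ih _ hz (fun s hs => hall s (List.mem_cons_of_mem _ hs))]
    apply List.map_congr_left
    intro i hi
    have hin : i < n := List.mem_range.1 hi
    have h1 : (List.zipWith (· + ·) acc r).getD i 0 = acc.getD i 0 + r.getD i 0 := by
      rw [List.getD_eq_getElem _ _ (by omega), List.getElem_zipWith,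
        List.getD_eq_getElem _ _ (by omega), List.getD_eq_getElem _ _ (by omega)]
    rw [h1]
    simp only [List.map_cons, List.sum_cons]
    ring

theorem pvMainEq (matrix : List (List Int)) (hne : matrix ≠ [])
    (hhd : matrix.headD [] ≠ [])
    (hrect : ∀ r ∈ matrix, r.length = (matrix.headD []).length) :
    get_row_col_maxsum matrix = get_row_col_maxsum_alt matrix := by
  obtain ⟨r0, rest, rfl⟩ := List.exists_cons_of_ne_nil hne
  have hhd' : (r0 :: rest).headD [] = r0 := rfl
  rw [hhd'] at hrect hhd
  have hrest : ∀ r ∈ rest, r.length = r0.length :=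
    fun r hr => hrect r (List.mem_cons_of_mem _ hr)
  have hn0 : 0 < r0.length := by
    cases r0 with
    | nil => exact absurd rfl hhd
    | cons a t => simp
  simp only [get_row_col_maxsum, get_row_col_maxsum_alt]
  rw [PySem.List.pyGetD_zero_cons, pvCount, pvCount,
    pvRowSums (r0 :: rest) r0.length hrect,
    pvColSums (r0 :: rest) r0.length,
    PySem.List.slice_from_one, List.tail_cons, pvPairFold,
    pvBestRowFold, pvColFold r0.length rest r0 rfl hrest]
  -- column vectors: A's list of index-wise column sums = B's accumulated vector
  have hcols : (List.range r0.length).map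
      (fun i => ((r0 :: rest).map (fun r => r.getD i 0)).sum)
      = (List.range r0.length).map
        (fun i => r0.getD i 0 + (rest.map (fun r => r.getD i 0)).sum) := by
    apply List.map_congr_left
    intro i _
    simp
  rw [hcols]
  -- max loops
  have hrowmax : ((r0 :: rest).map (fun row => row.sum)).foldl
        (fun m i => if m < i then i else m)
        (PySem.List.pyGetD ((r0 :: rest).map (fun row => row.sum)) 0 0)
      = (rest.map (fun row => row.sum)).foldl max r0.sum := by
    rw [List.map_cons, pvMaxLoopA]
  have hcolsne : (List.range r0.length).map
      (fun i => r0.getD i 0 + (rest.map (fun r => r.getD i 0)).sum) ≠ [] := by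
    simp [List.range_eq_nil]
    omega
  obtain ⟨c0, ct, hct⟩ := List.exists_cons_of_ne_nil hcolsne
  rw [hct, pvMaxLoopA, PySem.List.max?_id_cons, hrowmax]
  simp

-- ===== VERDICT (by name: the statement is the Claim_ definition above) =====
theorem get_row_col_maxsum_spec : Claim_equal_get_row_col_maxsum := by
  intro matrix _ hpre
  obtain ⟨hne, hhd, hrect⟩ := hpre
  exact (pvMainEq matrix hne hhd hrect).symm ▸ rfl
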